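-- pv_equiv track=rewrite | github.com/Vishaal1409/codingtasks | module1/2.py | find_the_indices
-- ===== SOURCE A (Python) =====
-- def find_the_indices(user_string):
--     user_string_lower = user_string.lower()
--     pattern = "the"
--     indices = []
--     start = 0
--     while True:
--         index = user_string_lower.find(pattern, start)
--         if index == -1:
--             break
--         indices.append(index)
--         start = index + 1
--     return indices
-- ===== SOURCE B (Python) =====
-- def find_the_indices(user_string):
--     lo = user_string.lower()
--     return [i for i in range(len(lo) - 2) if lo[i:i+3] == "the"]
-- ===== Notes on version B (the rewrite author's own statement) =====
-- stated objective: simpler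
-- what changed: Replaces the find-and-jump while loop (repeated str.find with an advancing start) by a single per-position list comprehension testing the 3-char slice at every index.
import Mathlib
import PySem

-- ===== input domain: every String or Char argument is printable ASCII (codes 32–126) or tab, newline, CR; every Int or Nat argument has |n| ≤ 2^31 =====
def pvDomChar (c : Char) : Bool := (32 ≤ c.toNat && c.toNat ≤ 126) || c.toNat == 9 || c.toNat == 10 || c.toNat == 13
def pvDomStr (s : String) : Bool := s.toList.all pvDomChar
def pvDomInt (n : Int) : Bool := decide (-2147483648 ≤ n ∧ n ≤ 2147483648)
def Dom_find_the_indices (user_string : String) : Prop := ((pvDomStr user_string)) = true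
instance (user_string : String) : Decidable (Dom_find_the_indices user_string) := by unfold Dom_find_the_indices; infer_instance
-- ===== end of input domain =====

-- B replaces A's find-and-jump while loop by one per-position slice comparison (simpler decomposition, same results).

-- ===== PORT A =====
-- the while-True loop of A; fuel bounds the iterations (the proof shows len+1 suffices)
def findTheLoop (lo : String) : Nat → Int → List Int
  | 0, _ => []
  | fuel + 1, start =>
    let index := PySem.Str.findFrom lo "the" start none
    if index = -1 then [] else index :: findTheLoop lo fuel (index + 1)

def find_the_indices (user_string : String) : List Int :=
  let lo := PySem.Str.lower user_string
  findTheLoop lo ((PySem.Str.len lo).toNat + 1) 0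

-- ===== PORT B =====
def find_the_indices_alt (user_string : String) : List Int :=
  let lo := PySem.Str.lower user_string
  (PySem.List.pyRange 0 (PySem.Str.len lo - 2) 1).filter
    (fun i => PySem.Str.slice lo (some i) (some (i + 3)) == "the")

-- ===== PRECONDITION & SPEC =====
def Spec_find_the_indices (user_string : String) (out : List Int) : Prop := out = find_the_indices_alt user_string
instance (user_string : String) (out : List Int) : Decidable (Spec_find_the_indices user_string out) := by unfold Spec_find_the_indices; infer_instance

-- ===== CLAIM (what is proved, stated in full; the proofs are below) =====
def Claim_equal_find_the_indices : Prop := ∀ (user_string : String), Dom_find_the_indices user_string → Spec_find_the_indices user_string (find_the_indices user_string)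

-- ===== LEMMAS AND PROOFS =====


-- pattern as a char-list literal
theorem pv_the : "the".toList = ['t','h','e'] := by decide

-- "the" cannot start at j when fewer than 3 chars remain
theorem pv_Pfalse (t : List Char) (j : Nat) (h : t.length ≤ j + 2) :
    ¬ (['t','h','e'] <+: t.drop j) := by
  intro hp
  have hlenle := hp.length_le
  rw [List.length_drop] at hlenle
  have h3len : (['t','h','e'] : List Char).length = 3 := rfl
  rw [h3len] at hlenle
  omega

-- pulling the first match out of a filtered range
theorem pv_filter_first {P : Nat → Prop} [DecidablePred P] {n start m : Nat}
    (hsm : start ≤ m) (hmn : m < n) (hP : P m)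
    (hmin : ∀ i, start ≤ i → i < m → ¬ P i) :
    (List.range n).filter (fun j => decide (start ≤ j ∧ P j)) =
      m :: (List.range n).filter (fun j => decide (m + 1 ≤ j ∧ P j)) := by
  obtain ⟨k, rfl⟩ : ∃ k, n = (m + 1) + k := ⟨n - (m + 1), by omega⟩
  rw [List.range_add, List.filter_append, List.filter_append]
  have h1 : (List.range (m + 1)).filter (fun j => decide (start ≤ j ∧ P j)) = [m] := by
    have hnil : (List.range m).filter (fun j => decide (start ≤ j ∧ P j)) = [] := by
      rw [List.filter_eq_nil_iff]
      intro j hj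
      simp only [List.mem_range] at hj
      simp only [decide_eq_true_eq, not_and]
      intro hs
      exact hmin j hs hj
    rw [List.range_succ, List.filter_append, hnil]
    simp [hsm, hP]
  have h2 : (List.range (m + 1)).filter (fun j => decide (m + 1 ≤ j ∧ P j)) = [] := by
    rw [List.filter_eq_nil_iff]
    intro j hj
    simp only [List.mem_range] at hj
    simp only [decide_eq_true_eq, not_and]
    omega
  have h3 : ((List.range k).map (fun x => (m + 1) + x)).filter (fun j => decide (start ≤ j ∧ P j)) =
      ((List.range k).map (fun x => (m + 1) + x)).filter (fun j => decide (m + 1 ≤ j ∧ P j)) := by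
    apply List.filter_congr
    intro x hx
    simp only [List.mem_map] at hx
    obtain ⟨i, _, rfl⟩ := hx
    have hle1 : start ≤ m + 1 + i := by omega
    have hle2 : m + 1 ≤ m + 1 + i := by omega
    simp [hle1, hle2]
  rw [h1, h2, h3]
  rfl

-- a filtered range may be cut where the predicate is everywhere false
theorem pv_filter_cut {P : Nat → Prop} [DecidablePred P] {n m : Nat}
    (hmn : m ≤ n) (h : ∀ j, m ≤ j → ¬ P j) :
    (List.range n).filter (fun j => decide (P j)) =
      (List.range m).filter (fun j => decide (P j)) := by
  obtain ⟨k, rfl⟩ : ∃ k, n = m + k := ⟨n - m, by omega⟩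
  rw [List.range_add, List.filter_append]
  have : ((List.range k).map (fun x => m + x)).filter (fun j => decide (P j)) = [] := by
    rw [List.filter_eq_nil_iff]
    intro j hj
    simp only [List.mem_map] at hj
    obtain ⟨i, _, rfl⟩ := hj
    simp only [decide_eq_true_eq]
    exact h _ (by omega)
  simp [this]

-- A's loop collects, in order, every index ≥ start at which "the" starts
theorem pv_loop (lo : String) : ∀ (fuel start : Nat),
    lo.toList.length + 1 - start ≤ fuel → start ≤ lo.toList.length →
    findTheLoop lo fuel (start : Int) =
      ((List.range lo.toList.length).filter
        (fun j => decide (start ≤ j ∧ ['t','h','e'] <+: lo.toList.drop j))).map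
        (fun j : Nat => (j : Int)) := by
  intro fuel
  induction fuel with
  | zero => intro start hf hs; omega
  | succ fuel ih =>
    intro start hf hs
    unfold findTheLoop
    simp only [PySem.Str.findFrom_eq, pv_the]
    by_cases h : PySem.Chars.findFrom lo.toList ['t','h','e'] (start : Int) none = -1
    · rw [if_pos h]
      have hno := (PySem.Chars.findFrom_natCast_eq_neg_one_iff lo.toList _ start hs).mp h
      have hfil : (List.range lo.toList.length).filter
          (fun j => decide (start ≤ j ∧ ['t','h','e'] <+: lo.toList.drop j)) = [] := by
        rw [List.filter_eq_nil_iff]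
        intro j _
        simp only [decide_eq_true_eq, not_and]
        intro hsj hp
        have hdd : lo.toList.drop j = (lo.toList.drop start).drop (j - start) := by
          rw [List.drop_drop]; congr 1; omega
        rw [hdd] at hp
        exact hno (hp.isInfix.trans (List.drop_suffix _ _).isInfix)
      rw [hfil]; rfl
    · rw [if_neg h]
      obtain ⟨h1, h2, h3⟩ := PySem.Chars.findFrom_natCast_spec lo.toList _ start hs h
      set idx := PySem.Chars.findFrom lo.toList ['t','h','e'] (start : Int) none with hidxdef
      have hm3 : idx.toNat + 3 ≤ lo.toList.length := by
        have hlenle := h2.length_le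
        rw [List.length_drop] at hlenle
        have h3len : (['t','h','e'] : List Char).length = 3 := rfl
        rw [h3len] at hlenle
        omega
      have hidxm : idx = ((idx.toNat : Nat) : Int) := by omega
      have hcast : idx + 1 = ((idx.toNat + 1 : Nat) : Int) := by omega
      rw [hcast, ih (idx.toNat + 1) (by omega) (by omega)]
      rw [pv_filter_first (P := fun j => ['t','h','e'] <+: lo.toList.drop j)
            (hsm := by omega) (hmn := by omega) (hP := h2)
            (hmin := fun i hi1 hi2 => h3 i hi1 hi2)]
      rw [List.map_cons, ← hidxm]

-- the per-position test of B agrees with the prefix predicate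
theorem pv_pred (lo : String) (j : Nat) :
    (PySem.Str.slice lo (some (j : Int)) (some ((j : Int) + 3)) == "the") =
      decide (['t','h','e'] <+: lo.toList.drop j) := by
  have hsl : (PySem.Str.slice lo (some (j : Int)) (some ((j : Int) + 3))).toList =
      (lo.toList.drop j).take 3 := by
    rw [PySem.Str.toList_slice, PySem.Chars.slice_eq_listSlice]
    have : ((j : Int) + 3) = ((j : Int) + ((3 : Nat) : Int)) := by push_cast; ring
    rw [this, PySem.List.slice_natCast_add]
  by_cases hp : ['t','h','e'] <+: lo.toList.drop j
  · simp only [hp, decide_true]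
    rw [beq_iff_eq]
    apply String.toList_inj.mp
    rw [hsl, pv_the]
    have := List.prefix_iff_eq_take.mp hp
    simpa using this.symm
  · simp only [hp, decide_false]
    rw [beq_eq_false_iff_ne]
    intro he
    apply hp
    rw [List.prefix_iff_eq_take]
    have : (lo.toList.drop j).take 3 = "the".toList := by rw [← hsl, he]
    simpa [pv_the] using this.symm

theorem pv_main (lo : String) :
    findTheLoop lo ((PySem.Str.len lo).toNat + 1) 0 =
      (PySem.List.pyRange 0 (PySem.Str.len lo - 2) 1).filter
        (fun i => PySem.Str.slice lo (some i) (some (i + 3)) == "the") := by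
  have hlen : (PySem.Str.len lo).toNat = lo.toList.length := by
    rw [PySem.Str.len_eq]; omega
  have hloop := pv_loop lo (lo.toList.length + 1) 0 (by omega) (by omega)
  simp only [Nat.cast_zero] at hloop
  rw [hlen, hloop]
  have hL : (List.range lo.toList.length).filter
      (fun j => decide (0 ≤ j ∧ ['t','h','e'] <+: lo.toList.drop j)) =
      (List.range lo.toList.length).filter
      (fun j => decide (['t','h','e'] <+: lo.toList.drop j)) := by
    apply List.filter_congr
    intro x _
    simp
  rw [hL, pv_filter_cut (m := lo.toList.length - 2) (by omega)
        (fun j hj => pv_Pfalse lo.toList j (by omega))]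
  rw [PySem.Str.len_eq, PySem.List.pyRange_one]
  have hn : (((lo.toList.length : Int) - 2) - 0).toNat = lo.toList.length - 2 := by omega
  rw [hn, List.filter_map]
  have hpred : ((fun i => PySem.Str.slice lo (some i) (some (i + 3)) == "the") ∘
      (fun k : Nat => ((0 : Int) + k))) =
      fun j : Nat => decide (['t','h','e'] <+: lo.toList.drop j) := by
    funext j
    simp only [Function.comp, zero_add]
    exact pv_pred lo j
  rw [hpred]
  simp only [zero_add]

-- ===== VERDICT (by name: the statement is the Claim_ definition above) =====
theorem find_the_indices_spec : Claim_equal_find_the_indices := by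
  intro s _
  unfold Spec_find_the_indices find_the_indices find_the_indices_alt
  exact pv_main _
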